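-- pv_equiv track=rewrite | github.com/Moataz-E/coding_problems | codility/5_genomic_range_query.py | dna_counter
-- ===== SOURCE A (Python) =====
-- from typing import List, Tuple
--
-- DNA_CNTR_LOC = {'A': 0, 'C': 1, 'G': 2, 'T': 3}
--
-- def dna_counter(A: List[int]) -> List[Tuple[int, int, int, int]]:
--     """Generates counter where each slot counts how many of each dna type seen.
--     """
--     ps = [None] * (len(A)+1)
--     counter = [0,0,0,0]
--     ps[0] = tuple(counter)
--     for i in range(1, len(A) + 1):
--         counter[DNA_CNTR_LOC[A[i-1]]] += 1
--         ps[i] = tuple(counter)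
--     return ps
-- ===== SOURCE B (Python) =====
-- from itertools import accumulate
-- from typing import List, Tuple
--
-- DNA_CNTR_LOC = {'A': 0, 'C': 1, 'G': 2, 'T': 3}
--
-- def dna_counter(A: List[int]) -> List[Tuple[int, int, int, int]]:
--     idx = [DNA_CNTR_LOC[c] for c in A]
--     cols = [list(accumulate((1 if k == j else 0 for k in idx), initial=0))
--             for j in range(4)]
--     return [t for t in zip(*cols)]
-- ===== Notes on version B (the rewrite author's own statement) =====
-- stated objective: alternative
-- what changed: Replaces the single running-4-tuple scan with four independent per-nucleotide prefix-count columns built with itertools.accumulate and zipped together at the end.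
import Mathlib
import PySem

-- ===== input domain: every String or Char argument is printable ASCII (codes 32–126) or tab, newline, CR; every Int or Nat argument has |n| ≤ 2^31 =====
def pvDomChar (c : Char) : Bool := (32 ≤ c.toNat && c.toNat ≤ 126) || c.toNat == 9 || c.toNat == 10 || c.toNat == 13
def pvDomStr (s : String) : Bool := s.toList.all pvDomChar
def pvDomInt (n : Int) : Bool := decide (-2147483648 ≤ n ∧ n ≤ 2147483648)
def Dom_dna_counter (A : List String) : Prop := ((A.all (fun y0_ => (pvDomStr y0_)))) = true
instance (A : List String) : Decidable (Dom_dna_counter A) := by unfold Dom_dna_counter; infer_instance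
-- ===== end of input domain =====

-- B replaces A's single running-4-tuple scan with four independent per-nucleotide
-- prefix-count columns zipped together at the end (alternative decomposition, same cost).


-- shared module constant DNA_CNTR_LOC (used by both Pythons)
def DNA_CNTR_LOC : PySem.Dict String Int :=
  PySem.Dict.ofList [("A", 0), ("C", 1), ("G", 2), ("T", 3)]

-- DNA_CNTR_LOC[s]; KeyError (s not a key) is excluded by Pre_, default 0 unreachable there
def locOf (s : String) : Int := (PySem.Dict.get? DNA_CNTR_LOC s).getD 0

-- ===== PORT A =====
-- counter[DNA_CNTR_LOC[A[i-1]]] += 1 on the running 4-list (held as a 4-tuple)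
def bumpA (c : Int × Int × Int × Int) (j : Int) : Int × Int × Int × Int :=
  match c with
  | (a, cc, g, t) =>
    if j = 0 then (a + 1, cc, g, t)
    else if j = 1 then (a, cc + 1, g, t)
    else if j = 2 then (a, cc, g + 1, t)
    else (a, cc, g, t + 1)

-- the for-loop: appends tuple(counter) after each increment
def goA (c : Int × Int × Int × Int) : List String → List (Int × Int × Int × Int)
  | [] => []
  | s :: rest =>
    let c' := bumpA c (locOf s)
    c' :: goA c' rest

def dna_counter (A : List String) : List (Int × Int × Int × Int) :=
  (0, 0, 0, 0) :: goA (0, 0, 0, 0) A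

-- ===== PORT B =====
-- 1 if k == j else 0
def indB (j k : Int) : Int := if k = j then 1 else 0

-- itertools.accumulate (without the initial element)
def accumB (acc : Int) : List Int → List Int
  | [] => []
  | x :: xs => (acc + x) :: accumB (acc + x) xs

-- zip(*cols) over the four columns
def zip4B : List Int → List Int → List Int → List Int → List (Int × Int × Int × Int)
  | a :: as_, c :: cs, g :: gs, t :: ts => (a, c, g, t) :: zip4B as_ cs gs ts
  | _, _, _, _ => []

def dna_counter_alt (A : List String) : List (Int × Int × Int × Int) :=
  let idx := A.map locOf
  let col := fun (j : Int) => (0 : Int) :: accumB 0 (idx.map (indB j))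
  zip4B (col 0) (col 1) (col 2) (col 3)

-- ===== PRECONDITION & SPEC =====
-- Pre_ excludes exactly the inputs where Python A raises KeyError (an element not in DNA_CNTR_LOC)
def Pre_dna_counter (A : List String) : Prop :=
  ∀ s ∈ A, s = "A" ∨ s = "C" ∨ s = "G" ∨ s = "T"
instance (A : List String) : Decidable (Pre_dna_counter A) := by unfold Pre_dna_counter; infer_instance
def pvWitness_dna_counter : List String := ["A", "C", "G", "T", "A"]

def Spec_dna_counter (A : List String) (out : List (Int × Int × Int × Int)) : Prop := out = dna_counter_alt A
instance (A : List String) (out : List (Int × Int × Int × Int)) : Decidable (Spec_dna_counter A out) := by unfold Spec_dna_counter; infer_instance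

-- ===== CLAIM (what is proved, stated in full; the proofs are below) =====
def Claim_equal_dna_counter : Prop := ∀ (A : List String), Dom_dna_counter A → Pre_dna_counter A → Spec_dna_counter A (dna_counter A)

-- ===== LEMMAS AND PROOFS =====
lemma DNA_CNTR_LOC_eq_mk :
    DNA_CNTR_LOC = PySem.Dict.mk [("A", 0), ("C", 1), ("G", 2), ("T", 3)] := by decide

lemma locOf_cases (s : String) : locOf s = 0 ∨ locOf s = 1 ∨ locOf s = 2 ∨ locOf s = 3 := by
  by_cases h1 : s = "A"
  · subst h1; decide
  by_cases h2 : s = "C"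
  · subst h2; decide
  by_cases h3 : s = "G"
  · subst h3; decide
  by_cases h4 : s = "T"
  · subst h4; decide
  have e1 : (("A" : String) == s) = false := beq_eq_false_iff_ne.mpr (Ne.symm h1)
  have e2 : (("C" : String) == s) = false := beq_eq_false_iff_ne.mpr (Ne.symm h2)
  have e3 : (("G" : String) == s) = false := beq_eq_false_iff_ne.mpr (Ne.symm h3)
  have e4 : (("T" : String) == s) = false := beq_eq_false_iff_ne.mpr (Ne.symm h4)
  simp [locOf, DNA_CNTR_LOC_eq_mk, PySem.Dict.get?, List.find?, e1, e2, e3, e4]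

lemma bumpA_eq (a c g t j : Int) (h : j = 0 ∨ j = 1 ∨ j = 2 ∨ j = 3) :
    bumpA (a, c, g, t) j = (a + indB 0 j, c + indB 1 j, g + indB 2 j, t + indB 3 j) := by
  rcases h with rfl | rfl | rfl | rfl <;> simp [bumpA, indB]

lemma key_lemma (L : List String) : ∀ (a c g t : Int),
    zip4B (accumB a ((L.map locOf).map (indB 0))) (accumB c ((L.map locOf).map (indB 1)))
          (accumB g ((L.map locOf).map (indB 2))) (accumB t ((L.map locOf).map (indB 3)))
      = goA (a, c, g, t) L := by
  induction L with
  | nil => intro a c g t; simp [accumB, zip4B, goA]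
  | cons s rest ih =>
    intro a c g t
    simp only [List.map_cons, accumB, zip4B, goA]
    rw [bumpA_eq a c g t (locOf s) (locOf_cases s)]
    exact congrArg _ (ih _ _ _ _)

-- ===== VERDICT (by name: the statement is the Claim_ definition above) =====
theorem dna_counter_spec : Claim_equal_dna_counter := by
  intro A _ _
  show dna_counter A = dna_counter_alt A
  simp only [dna_counter, dna_counter_alt, zip4B]
  exact congrArg _ (key_lemma A 0 0 0 0).symm
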